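-- pv_equiv track=rewrite | github.com/NanayaHaruki/leetcode | 面试题/面试题 16.19. 水域大小.py | pondSizes
-- ===== SOURCE A (Python) =====
-- from typing import List
--
-- def pondSizes(land: List[List[int]]) -> List[int]:
--     '''0是水 返回池塘大小; 斜着也算连接'''
--     def bfs(i,j):
--         '''返回与i j 连接的池塘大小'''
--         q=deque([(i,j)])
--         ans=1
--         land[i][j]=1
--         while q:
--             x,y=q.popleft()
--             for dx,dy in dirs:
--                 nx,ny=x+dx,y+dy
--                 if 0<=nx<m and 0<=ny<n and land[nx][ny]==0:
--                     land[nx][ny]=1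
--                     q.append((nx,ny))
--                     ans+=1
--         return ans
--
--     def dfs(i,j):
--         if i<0 or i>=m or j<0 or j>=n or land[i][j]:
--             return 0
--         land[i][j] =1
--         ans=1
--         for dx,dy in dirs:
--             nx,ny=i+dx,j+dy
--             ans+=dfs(nx,ny)
--         return ans
--     m,n=len(land),len(land[0])
--     dirs=[(i,j) for i in range(-1,2) for j in range(-1,2) if i or j]
--     ans=[]
--     for i in range(m):
--         for j in range(n):
--             if land[i][j]==0:
--                 ans.append(dfs(i,j))
--     ans.sort()
--     return ans
-- ===== SOURCE B (Python) =====
-- def pondSizes(land):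
--     '''0是水 返回池塘大小; 斜着也算连接'''
--     m, n = len(land), len(land[0])
--     sizes = []
--     # single flat scan over cell indices instead of nested row/column loops
--     for k in range(m * n):
--         i, j = divmod(k, n)
--         if land[i][j] == 0:
--             # iterative flood fill with an explicit worklist instead of recursion;
--             # neighbours pushed so the worklist pops them in reading order
--             work = [(i, j)]
--             size = 0
--             while work:
--                 x, y = work.pop()
--                 if 0 <= x < m and 0 <= y < n and land[x][y] == 0:
--                     land[x][y] = 1
--                     size += 1
--                     for dx, dy in ((1, 1), (1, 0), (1, -1), (0, 1),
--                                    (0, -1), (-1, 1), (-1, 0), (-1, -1)):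
--                         work.append((x + dx, y + dy))
--             sizes.append(size)
--     return sorted(sizes)
-- ===== Notes on version B (the rewrite author's own statement) =====
-- stated objective: alternative
-- what changed: A's nested row/column scan with a recursive dfs is replaced by a single flat scan over cell indices k in range(m*n) with divmod(k,n), each pond measured by an iterative worklist flood fill (pop a cell, mark and count it, push its 8 neighbours) instead of recursion, and the sizes returned via sorted().
import Mathlib
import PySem

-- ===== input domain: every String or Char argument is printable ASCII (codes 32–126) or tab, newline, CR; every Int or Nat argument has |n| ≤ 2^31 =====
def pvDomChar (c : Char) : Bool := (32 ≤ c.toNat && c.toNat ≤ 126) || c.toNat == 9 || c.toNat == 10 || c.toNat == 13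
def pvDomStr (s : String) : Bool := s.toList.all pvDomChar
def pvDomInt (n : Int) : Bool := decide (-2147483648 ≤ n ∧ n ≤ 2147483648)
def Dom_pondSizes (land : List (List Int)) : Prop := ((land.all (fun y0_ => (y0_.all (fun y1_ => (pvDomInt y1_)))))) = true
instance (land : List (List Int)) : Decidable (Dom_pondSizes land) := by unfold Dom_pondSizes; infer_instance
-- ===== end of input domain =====

-- B replaces A's nested row/column scan + recursive dfs by a single flat scan over cell
-- indices (divmod) with an iterative worklist flood fill (objective: alternative).
-- Both A and B mutate `land` in place in Python (every reached water cell becomes 1,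
-- identically); the equivalence proved here is about the RETURN value only.

-- ===== PORT A =====

-- land[i][j] read (guarded in-bounds by both programs before use)
def pvCell (g : List (List Int)) (i j : Int) : Int :=
  (g.getD i.toNat []).getD j.toNat 0

-- land[i][j] = 1
def pvSet1 (g : List (List Int)) (i j : Int) : List (List Int) :=
  g.set i.toNat ((g.getD i.toNat []).set j.toNat 1)

-- dirs = [(i,j) for i in range(-1,2) for j in range(-1,2) if i or j]
def pvDirs : List (Int × Int) :=
  [(-1,-1),(-1,0),(-1,1),(0,-1),(0,1),(1,-1),(1,0),(1,1)]

-- number of water cells; used only as recursion fuel (a totality guard)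
def pvZeros (g : List (List Int)) : Nat :=
  (g.map (fun r => r.countP (fun v => v == 0))).sum

-- A's recursive dfs; fuel is a totality guard never exhausted at the call sites below
def dfsF (m n : Int) : Nat → List (List Int) → Int → Int → List (List Int) × Int
  | 0, g, _, _ => (g, 0)
  | fuel+1, g, i, j =>
    if i < 0 ∨ m ≤ i ∨ j < 0 ∨ n ≤ j then (g, 0)
    else if pvCell g i j ≠ 0 then (g, 0)
    else
      pvDirs.foldl
        (fun (p : List (List Int) × Int) d =>
          let r := dfsF m n fuel p.1 (i + d.1) (j + d.2)
          (r.1, p.2 + r.2))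
        (pvSet1 g i j, 1)

-- for j in range(n): if land[i][j]==0: ans.append(dfs(i,j))
def pvRowA (m n i : Int) : List Int → List (List Int) → List Int → List (List Int) × List Int
  | [], g, acc => (g, acc)
  | j :: js, g, acc =>
    if pvCell g i j = 0 then
      let r := dfsF m n (pvZeros g + 1) g i j
      pvRowA m n i js r.1 (acc ++ [r.2])
    else pvRowA m n i js g acc

def pvGridA (m n : Int) : List Int → List (List Int) → List Int → List (List Int) × List Int
  | [], g, acc => (g, acc)
  | i :: is, g, acc =>
    let r := pvRowA m n i (PySem.List.pyRange 0 n 1) g acc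
    pvGridA m n is r.1 r.2

def pondSizes (land : List (List Int)) : List Int :=
  let m : Int := land.length
  let n : Int := (land.headD []).length
  let r := pvGridA m n (PySem.List.pyRange 0 m 1) land []
  PySem.List.sorted r.2 (fun v => v) false

-- ===== PORT B =====

-- B's dirs tuple (pushed onto the stack; popped in the reverse order)
def pvDirsB : List (Int × Int) :=
  [(1,1),(1,0),(1,-1),(0,1),(0,-1),(-1,1),(-1,0),(-1,-1)]

-- B's while loop over the worklist; the Python list stack is represented with its
-- top (= Python's last element, the one `pop()` takes) at the HEAD of the Lean list,
-- so `work.append(v)` is `v :: work`.  fuel is a totality guard.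
def floodF (m n : Int) : Nat → List (Int × Int) → List (List Int) → Int → List (List Int) × Int
  | 0, _, g, size => (g, size)
  | _+1, [], g, size => (g, size)
  | fuel+1, (x, y) :: rest, g, size =>
    if 0 ≤ x ∧ x < m ∧ 0 ≤ y ∧ y < n ∧ pvCell g x y = 0 then
      floodF m n fuel
        (pvDirsB.foldl (fun w d => (x + d.1, y + d.2) :: w) rest)
        (pvSet1 g x y) (size + 1)
    else floodF m n fuel rest g size

-- for k in range(m*n): i, j = divmod(k, n); …
-- divmod(k, n): n ≠ 0 whenever this code is reached (for n = 0 the range 0..m*n is empty),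
-- so the total floordiv/mod are exact here.
def pvScanB (m n : Int) : List Int → List (List Int) → List Int → List (List Int) × List Int
  | [], g, sizes => (g, sizes)
  | k :: ks, g, sizes =>
    let i := PySem.Int.floordiv k n
    let j := PySem.Int.mod k n
    if pvCell g i j = 0 then
      let r := floodF m n (9 * pvZeros g + 1) [(i, j)] g 0
      pvScanB m n ks r.1 (sizes ++ [r.2])
    else pvScanB m n ks g sizes

def pondSizes_alt (land : List (List Int)) : List Int :=
  let m : Int := land.length
  let n : Int := (land.headD []).length
  let r := pvScanB m n (PySem.List.pyRange 0 (m * n) 1) land []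
  PySem.List.sorted r.2 (fun v => v) false

-- ===== PRECONDITION & SPEC =====
-- Pre_ excludes exactly the inputs where A raises IndexError: the empty grid (len(land[0]))
-- and grids with some row shorter than the first row (the scan reads land[i][j] for all j < n).
def Pre_pondSizes (land : List (List Int)) : Prop :=
  land ≠ [] ∧ ∀ r ∈ land, ((land.headD []).length : Int) ≤ (r.length : Int)
instance (land : List (List Int)) : Decidable (Pre_pondSizes land) := by
  unfold Pre_pondSizes; infer_instance

def pvWitness_pondSizes : List (List Int) := [[0, 1], [1, 0]]

def Spec_pondSizes (land : List (List Int)) (out : List Int) : Prop := out = pondSizes_alt land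
instance (land : List (List Int)) (out : List Int) : Decidable (Spec_pondSizes land out) := by
  unfold Spec_pondSizes; infer_instance

-- ===== CLAIM (what is proved, stated in full; the proofs are below) =====
def Claim_equal_pondSizes : Prop := ∀ (land : List (List Int)), Dom_pondSizes land → Pre_pondSizes land → Spec_pondSizes land (pondSizes land)

-- ===== LEMMAS AND PROOFS =====

-- grid-shape invariant: m rows, each of length ≥ n
def pvInv (m n : Int) (g : List (List Int)) : Prop :=
  (g.length : Int) = m ∧ ∀ r ∈ g, n ≤ (r.length : Int)

lemma pvSet1_shape (g : List (List Int)) (i j : Int) :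
    (pvSet1 g i j).map List.length = g.map List.length := by
  unfold pvSet1
  by_cases h : i.toNat < g.length
  · rw [List.map_set]
    simp only [List.length_set]
    rw [List.getD_eq_getElem _ _ h]
    have h2 : i.toNat < (g.map List.length).length := by simpa using h
    rw [show (g[i.toNat]).length = (g.map List.length)[i.toNat] from (List.getElem_map _).symm]
    exact List.set_getElem_self h2
  · rw [List.set_eq_of_length_le (Nat.le_of_not_lt h)]

lemma pvInv_of_shape {m n : Int} {g g' : List (List Int)}
    (h : g'.map List.length = g.map List.length) (hg : pvInv m n g) : pvInv m n g' := by
  constructor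
  · have hl : g'.length = g.length := by
      have := congrArg List.length h; simpa using this
    rw [hl]; exact hg.1
  · intro r hr
    have hm : r.length ∈ g.map List.length := by
      rw [← h]; exact List.mem_map_of_mem hr
    obtain ⟨r0, hr0, he⟩ := List.mem_map.1 hm
    have := hg.2 r0 hr0
    rw [← he]; exact this

lemma pvCountP_set_one_le : ∀ (l : List Int) (k : Nat),
    (l.set k (1:Int)).countP (fun v => v == 0) ≤ l.countP (fun v => v == 0) := by
  intro l
  induction l with
  | nil => intro k; simp
  | cons a t ih =>
    intro k
    cases k with
    | zero =>
      have h1 : ((1:Int) == 0) = false := by decide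
      simp only [List.set, List.countP_cons, h1, Bool.false_eq_true, if_false]
      split_ifs <;> omega
    | succ k =>
      simp only [List.set, List.countP_cons]
      have := ih k
      split_ifs <;> omega

lemma pvCountP_set_zero : ∀ (l : List Int) (k : Nat), k < l.length → l.getD k 0 = 0 →
    (l.set k (1:Int)).countP (fun v => v == 0) + 1 = l.countP (fun v => v == 0) := by
  intro l
  induction l with
  | nil => intro k hk; simp at hk
  | cons a t ih =>
    intro k hk h0
    cases k with
    | zero =>
      simp at h0
      subst h0
      simp
    | succ k =>
      simp only [List.set, List.countP_cons]
      have hk' : k < t.length := by simpa using hk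
      have h0' : t.getD k 0 = 0 := by simpa using h0
      have := ih k hk' h0'
      split_ifs <;> omega

lemma pvZeros_cons (r : List Int) (g : List (List Int)) :
    pvZeros (r :: g) = r.countP (fun v => v == 0) + pvZeros g := by
  simp [pvZeros]

lemma pvZeros_set_row : ∀ (g : List (List Int)) (k : Nat) (row' : List Int), k < g.length →
    pvZeros (g.set k row') + (g.getD k []).countP (fun v => v == 0)
      = pvZeros g + row'.countP (fun v => v == 0) := by
  intro g
  induction g with
  | nil => intro k row' hk; simp at hk
  | cons a t ih =>
    intro k row' hk
    cases k with
    | zero => simp [pvZeros_cons]; omega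
    | succ k =>
      have hk' : k < t.length := by simpa using hk
      simp only [List.set, List.getD_cons_succ, pvZeros_cons]
      have := ih k row' hk'
      omega

lemma pvZeros_set1 {g : List (List Int)} {x y : Int}
    (hx : x.toNat < g.length) (hy : y.toNat < (g.getD x.toNat []).length)
    (hc : pvCell g x y = 0) :
    pvZeros (pvSet1 g x y) + 1 = pvZeros g := by
  have hrow := pvCountP_set_zero (g.getD x.toNat []) y.toNat hy hc
  have := pvZeros_set_row g x.toNat ((g.getD x.toNat []).set y.toNat 1) hx
  unfold pvSet1
  omega

lemma pvZeros_set1_le (g : List (List Int)) (x y : Int) :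
    pvZeros (pvSet1 g x y) ≤ pvZeros g := by
  by_cases hx : x.toNat < g.length
  · have h1 := pvZeros_set_row g x.toNat ((g.getD x.toNat []).set y.toNat 1) hx
    have h2 := pvCountP_set_one_le (g.getD x.toNat []) y.toNat
    unfold pvSet1
    omega
  · unfold pvSet1
    rw [List.set_eq_of_length_le (Nat.le_of_not_lt hx)]

lemma pvInbounds {m n : Int} {g : List (List Int)} (hInv : pvInv m n g) {i j : Int}
    (hb : ¬(i < 0 ∨ m ≤ i ∨ j < 0 ∨ n ≤ j)) :
    i.toNat < g.length ∧ j.toNat < (g.getD i.toNat []).length := by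
  push Not at hb
  have hg : (g.length : Int) = m := hInv.1
  have hx : i.toNat < g.length := by omega
  refine ⟨hx, ?_⟩
  rw [List.getD_eq_getElem _ _ hx]
  have hmem : g[i.toNat] ∈ g := List.getElem_mem hx
  have := hInv.2 _ hmem
  omega

lemma pvZeros_pos {m n : Int} {g : List (List Int)} {i j : Int} (hInv : pvInv m n g)
    (hb : ¬(i < 0 ∨ m ≤ i ∨ j < 0 ∨ n ≤ j)) (hc : pvCell g i j = 0) :
    1 ≤ pvZeros g := by
  obtain ⟨hx, hy⟩ := pvInbounds hInv hb
  have := pvZeros_set1 hx hy hc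
  omega

lemma pvFoldStep_shape (m n : Int) (f : Nat) (i j : Int)
    (h : ∀ g i' j', (dfsF m n f g i' j').1.map List.length = g.map List.length) :
    ∀ (ds : List (Int × Int)) (p : List (List Int) × Int),
    ((ds.foldl (fun (p : List (List Int) × Int) d =>
        let r := dfsF m n f p.1 (i + d.1) (j + d.2)
        (r.1, p.2 + r.2)) p).1).map List.length = p.1.map List.length := by
  intro ds
  induction ds with
  | nil => intro p; rfl
  | cons d ds ih =>
    intro p
    rw [List.foldl_cons, ih]
    exact h p.1 _ _

lemma dfsF_shape (m n : Int) : ∀ (f : Nat) (g : List (List Int)) (i j : Int),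
    (dfsF m n f g i j).1.map List.length = g.map List.length := by
  intro f
  induction f with
  | zero => intro g i j; rfl
  | succ f ih =>
    intro g i j
    simp only [dfsF]
    split_ifs with h1 h2
    · rfl
    · rfl
    · exact (pvFoldStep_shape m n f i j ih pvDirs (pvSet1 g i j, 1)).trans (pvSet1_shape g i j)

lemma pvFoldStep_zeros (m n : Int) (f : Nat) (i j : Int)
    (h : ∀ g i' j', pvZeros (dfsF m n f g i' j').1 ≤ pvZeros g) :
    ∀ (ds : List (Int × Int)) (p : List (List Int) × Int),
    pvZeros ((ds.foldl (fun (p : List (List Int) × Int) d =>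
        let r := dfsF m n f p.1 (i + d.1) (j + d.2)
        (r.1, p.2 + r.2)) p).1) ≤ pvZeros p.1 := by
  intro ds
  induction ds with
  | nil => intro p; exact le_refl _
  | cons d ds ih =>
    intro p
    rw [List.foldl_cons]
    exact le_trans (ih _) (h p.1 _ _)

lemma dfsF_zeros_le (m n : Int) : ∀ (f : Nat) (g : List (List Int)) (i j : Int),
    pvZeros (dfsF m n f g i j).1 ≤ pvZeros g := by
  intro f
  induction f with
  | zero => intro g i j; exact le_refl _
  | succ f ih =>
    intro g i j
    simp only [dfsF]
    split_ifs with h1 h2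
    · exact le_refl _
    · exact le_refl _
    · exact le_trans (pvFoldStep_zeros m n f i j ih pvDirs (pvSet1 g i j, 1))
        (pvZeros_set1_le g i j)

lemma pvFoldStep_congr (m n : Int) (a b B : Nat) (i j : Int)
    (h : ∀ g i' j', pvInv m n g → pvZeros g ≤ B → dfsF m n a g i' j' = dfsF m n b g i' j') :
    ∀ (ds : List (Int × Int)) (p : List (List Int) × Int), pvInv m n p.1 → pvZeros p.1 ≤ B →
    ds.foldl (fun (p : List (List Int) × Int) d =>
        let r := dfsF m n a p.1 (i + d.1) (j + d.2)
        (r.1, p.2 + r.2)) p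
      = ds.foldl (fun (p : List (List Int) × Int) d =>
        let r := dfsF m n b p.1 (i + d.1) (j + d.2)
        (r.1, p.2 + r.2)) p := by
  intro ds
  induction ds with
  | nil => intros; rfl
  | cons d ds ih =>
    intro p hInv hB
    rw [List.foldl_cons, List.foldl_cons]
    rw [← h p.1 _ _ hInv hB]
    exact ih _ (pvInv_of_shape (dfsF_shape m n a p.1 _ _) hInv)
      (le_trans (dfsF_zeros_le m n a p.1 _ _) hB)

lemma dfsF_fuel_irrel (m n : Int) : ∀ (z : Nat) (g : List (List Int)), pvZeros g ≤ z →
    ∀ (f1 f2 : Nat) (i j : Int), pvInv m n g → pvZeros g < f1 → pvZeros g < f2 →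
    dfsF m n f1 g i j = dfsF m n f2 g i j := by
  intro z
  induction z with
  | zero =>
    intro g hz f1 f2 i j hInv h1 h2
    cases f1 with
    | zero => omega
    | succ a =>
      cases f2 with
      | zero => omega
      | succ b =>
        simp only [dfsF]
        split_ifs with hb hc
        · rfl
        · rfl
        · exfalso
          have hc0 : pvCell g i j = 0 := by
            by_contra hne; exact hc hne
          have := pvZeros_pos hInv hb hc0
          omega
  | succ z ih =>
    intro g hz f1 f2 i j hInv h1 h2
    cases f1 with
    | zero => omega
    | succ a =>
      cases f2 with
      | zero => omega
      | succ b =>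
        simp only [dfsF]
        split_ifs with hb hc
        · rfl
        · rfl
        · have hc0 : pvCell g i j = 0 := by
            by_contra hne; exact hc hne
          obtain ⟨hx, hy⟩ := pvInbounds hInv hb
          have hzs := pvZeros_set1 hx hy hc0
          apply pvFoldStep_congr m n a b (pvZeros g - 1) i j
          · intro g' i' j' hInv' hz'
            exact ih g' (by omega) a b i' j' hInv' (by omega) (by omega)
          · exact pvInv_of_shape (pvSet1_shape g i j) hInv
          · simpa using Nat.le_of_eq (by omega : pvZeros (pvSet1 g i j) = pvZeros g - 1)

-- A's recursion unfolded over an explicit list of pending cells (proof device)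
def dfsList (m n : Int) : List (Int × Int) → List (List Int) → List (List Int) × Int
  | [], g => (g, 0)
  | c :: cs, g =>
    let r := dfsF m n (pvZeros g + 1) g c.1 c.2
    let r2 := dfsList m n cs r.1
    (r2.1, r.2 + r2.2)

lemma dfsList_append (m n : Int) : ∀ (as bs : List (Int × Int)) (g : List (List Int)),
    dfsList m n (as ++ bs) g =
      ((dfsList m n bs (dfsList m n as g).1).1,
       (dfsList m n as g).2 + (dfsList m n bs (dfsList m n as g).1).2) := by
  intro as
  induction as with
  | nil => intro bs g; simp [dfsList]
  | cons c cs ih =>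
    intro bs g
    simp only [List.cons_append, dfsList]
    rw [ih]
    simp only [Prod.mk.injEq]
    exact ⟨by trivial, by ring⟩

lemma pvFoldStep_eq_dfsList (m n : Int) (f : Nat) (i j : Int) :
    ∀ (ds : List (Int × Int)) (p : List (List Int) × Int),
    pvInv m n p.1 → pvZeros p.1 < f →
    ds.foldl (fun (p : List (List Int) × Int) d =>
        let r := dfsF m n f p.1 (i + d.1) (j + d.2)
        (r.1, p.2 + r.2)) p
      = ((dfsList m n (ds.map fun d => (i + d.1, j + d.2)) p.1).1,
         p.2 + (dfsList m n (ds.map fun d => (i + d.1, j + d.2)) p.1).2) := by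
  intro ds
  induction ds with
  | nil => intro p hInv hf; simp [dfsList]
  | cons d ds ih =>
    intro p hInv hf
    rw [List.foldl_cons]
    have hFI : dfsF m n f p.1 (i + d.1) (j + d.2)
        = dfsF m n (pvZeros p.1 + 1) p.1 (i + d.1) (j + d.2) :=
      dfsF_fuel_irrel m n (pvZeros p.1) p.1 (le_refl _) f (pvZeros p.1 + 1) _ _ hInv hf
        (by omega)
    have hInv' : pvInv m n (dfsF m n f p.1 (i + d.1) (j + d.2)).1 :=
      pvInv_of_shape (dfsF_shape m n f p.1 _ _) hInv
    have hz' : pvZeros (dfsF m n f p.1 (i + d.1) (j + d.2)).1 < f :=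
      lt_of_le_of_lt (dfsF_zeros_le m n f p.1 _ _) hf
    show (List.foldl (fun (p : List (List Int) × Int) d =>
        let r := dfsF m n f p.1 (i + d.1) (j + d.2)
        (r.1, p.2 + r.2))
      ((dfsF m n f p.1 (i + d.1) (j + d.2)).1,
       p.2 + (dfsF m n f p.1 (i + d.1) (j + d.2)).2) ds) = _
    rw [ih ((dfsF m n f p.1 (i + d.1) (j + d.2)).1,
       p.2 + (dfsF m n f p.1 (i + d.1) (j + d.2)).2) hInv' hz']
    simp only [List.map_cons, dfsList]
    rw [← hFI]
    simp only [Prod.mk.injEq]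
    exact ⟨by trivial, by ring⟩

lemma dfs_unfold_valid {m n : Int} {g : List (List Int)} {i j : Int} {f : Nat}
    (hInv : pvInv m n g) (hf : pvZeros g < f + 1)
    (hb : ¬(i < 0 ∨ m ≤ i ∨ j < 0 ∨ n ≤ j)) (hc : pvCell g i j = 0) :
    dfsF m n (f+1) g i j =
      ((dfsList m n (pvDirs.map (fun d => (i + d.1, j + d.2))) (pvSet1 g i j)).1,
       1 + (dfsList m n (pvDirs.map (fun d => (i + d.1, j + d.2))) (pvSet1 g i j)).2) := by
  obtain ⟨hx, hy⟩ := pvInbounds hInv hb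
  have hzs := pvZeros_set1 hx hy hc
  simp only [dfsF]
  rw [if_neg hb, if_neg (fun hne => hne hc)]
  exact pvFoldStep_eq_dfsList m n f i j pvDirs (pvSet1 g i j, 1)
    (pvInv_of_shape (pvSet1_shape g i j) hInv)
    (by show pvZeros (pvSet1 g i j) < f; omega)

lemma pvPushAll (x y : Int) (rest : List (Int × Int)) :
    pvDirsB.foldl (fun w d => (x + d.1, y + d.2) :: w) rest
      = pvDirs.map (fun d => (x + d.1, y + d.2)) ++ rest := rfl

lemma floodF_eq_dfsList (m n : Int) : ∀ (fuel : Nat) (ws : List (Int × Int))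
    (g : List (List Int)) (s : Int), pvInv m n g →
    9 * pvZeros g + ws.length ≤ fuel →
    floodF m n fuel ws g s = ((dfsList m n ws g).1, s + (dfsList m n ws g).2) := by
  intro fuel
  induction fuel with
  | zero =>
    intro ws g s hInv hf
    have hws : ws = [] := by
      cases ws with
      | nil => rfl
      | cons c cs => simp at hf
    subst hws
    simp [floodF, dfsList]
  | succ fuel ih =>
    intro ws g s hInv hf
    cases ws with
    | nil => simp [floodF, dfsList]
    | cons c rest =>
      obtain ⟨x, y⟩ := c
      by_cases hC : 0 ≤ x ∧ x < m ∧ 0 ≤ y ∧ y < n ∧ pvCell g x y = 0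
      · obtain ⟨h1, h2, h3, h4, h5⟩ := hC
        have hb : ¬(x < 0 ∨ m ≤ x ∨ y < 0 ∨ n ≤ y) := by omega
        obtain ⟨hx, hy⟩ := pvInbounds hInv hb
        have hzs := pvZeros_set1 hx hy h5
        simp only [floodF]
        rw [if_pos ⟨h1, h2, h3, h4, h5⟩, pvPushAll]
        have hInv1 : pvInv m n (pvSet1 g x y) :=
          pvInv_of_shape (pvSet1_shape g x y) hInv
        have hlen : (pvDirs.map (fun d => (x + d.1, y + d.2)) ++ rest).length
            = 8 + rest.length := by simp [pvDirs]; omega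
        rw [ih _ _ _ hInv1 (by rw [hlen]; simp only [List.length_cons] at hf; omega)]
        rw [dfsList_append]
        conv_rhs => simp only [dfsList]
        rw [show dfsF m n (pvZeros g + 1) g x y
            = ((dfsList m n (pvDirs.map (fun d => (x + d.1, y + d.2))) (pvSet1 g x y)).1,
               1 + (dfsList m n (pvDirs.map (fun d => (x + d.1, y + d.2))) (pvSet1 g x y)).2)
          from by
            have : pvZeros g = (pvZeros g - 1) + 1 := by omega
            rw [this] at *
            exact dfs_unfold_valid hInv (by omega) hb h5]
        dsimp only
        simp only [Prod.mk.injEq]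
        exact ⟨by trivial, by ring⟩
      · simp only [floodF]
        rw [if_neg hC]
        have hstop : dfsF m n (pvZeros g + 1) g x y = (g, 0) := by
          simp only [dfsF]
          by_cases hbb : x < 0 ∨ m ≤ x ∨ y < 0 ∨ n ≤ y
          · rw [if_pos hbb]
          · rw [if_neg hbb, if_pos]
            intro hc0
            exact hC ⟨by omega, by omega, by omega, by omega, hc0⟩
        rw [ih rest g s hInv (by simp at hf ⊢; omega)]
        conv_rhs => simp only [dfsList]
        rw [hstop]
        simp

lemma flood_eq_dfs {m n : Int} {g : List (List Int)} {i j : Int} (hInv : pvInv m n g) :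
    floodF m n (9 * pvZeros g + 1) [(i, j)] g 0 = dfsF m n (pvZeros g + 1) g i j := by
  rw [floodF_eq_dfsList m n (9 * pvZeros g + 1) [(i, j)] g 0 hInv (by simp)]
  simp [dfsList]

lemma rowA_shape (m n i : Int) : ∀ (js : List Int) (g : List (List Int)) (acc : List Int),
    (pvRowA m n i js g acc).1.map List.length = g.map List.length := by
  intro js
  induction js with
  | nil => intros; rfl
  | cons j js ih =>
    intro g acc
    simp only [pvRowA]
    by_cases hc : pvCell g i j = 0
    · rw [if_pos hc]
      exact (ih _ _).trans (dfsF_shape m n _ g i j)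
    · rw [if_neg hc]
      exact ih g acc

-- divmod on a row-major flat index: divmod(i*n + j, n) = (i, j) for 0 ≤ j < n
lemma pvFloordiv_flat {i j n : Int} (hn : 0 < n) (h0 : 0 ≤ j) (hj : j < n) :
    PySem.Int.floordiv (i * n + j) n = i := by
  rw [PySem.Int.floordiv_eq_iff_of_pos hn]
  constructor
  · exact le_add_of_nonneg_right h0
  · rw [add_mul, one_mul]
    linarith

lemma pvMod_flat {i j n : Int} (hn : 0 < n) (h0 : 0 ≤ j) (hj : j < n) :
    PySem.Int.mod (i * n + j) n = j := by
  have h := PySem.Int.floordiv_mul_add_mod (i * n + j) n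
  rw [pvFloordiv_flat hn h0 hj] at h
  linarith

-- one row's worth of flat indices scanned by B = A's inner loop over column indices
lemma pvScanB_block (m n i : Int) (hn : 0 < n) :
    ∀ (js : List Int) (g : List (List Int)) (acc : List Int), pvInv m n g →
    (∀ j ∈ js, 0 ≤ j ∧ j < n) →
    pvScanB m n (js.map (fun j => i * n + j)) g acc = pvRowA m n i js g acc := by
  intro js
  induction js with
  | nil => intros; rfl
  | cons j js ih =>
    intro g acc hInv hjs
    obtain ⟨h0, hj⟩ := hjs j (List.mem_cons_self ..)
    simp only [List.map_cons, pvScanB, pvRowA,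
      pvFloordiv_flat hn h0 hj, pvMod_flat hn h0 hj]
    by_cases hc : pvCell g i j = 0
    · rw [if_pos hc, if_pos hc, flood_eq_dfs hInv]
      exact ih _ _ (pvInv_of_shape (dfsF_shape m n _ g i j) hInv)
        (fun x hx => hjs x (List.mem_cons_of_mem _ hx))
    · rw [if_neg hc, if_neg hc]
      exact ih g acc hInv (fun x hx => hjs x (List.mem_cons_of_mem _ hx))

lemma pvScanB_append (m n : Int) : ∀ (ks ls : List Int) (g : List (List Int)) (acc : List Int),
    pvScanB m n (ks ++ ls) g acc
      = pvScanB m n ls (pvScanB m n ks g acc).1 (pvScanB m n ks g acc).2 := by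
  intro ks
  induction ks with
  | nil => intros; rfl
  | cons k ks ih =>
    intro ls g acc
    simp only [List.cons_append, pvScanB]
    split_ifs <;> exact ih _ _ _

-- B's flat scan over the concatenated blocks = A's nested row scan
lemma pvScanB_blocks (m n : Int) (hn : 0 < n) :
    ∀ (is : List Int) (g : List (List Int)) (acc : List Int), pvInv m n g →
    pvScanB m n (is.flatMap (fun i =>
        (PySem.List.pyRange 0 n 1).map (fun j => i * n + j))) g acc
      = pvGridA m n is g acc := by
  intro is
  induction is with
  | nil => intros; rfl
  | cons i is ih =>
    intro g acc hInv
    rw [List.flatMap_cons, pvScanB_append, pvScanB_block m n i hn _ g acc hInv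
      (fun j hj => by
        have := (PySem.List.mem_pyRange_one).1 hj
        exact ⟨this.1, this.2⟩)]
    simp only [pvGridA]
    exact ih _ _ (pvInv_of_shape (rowA_shape m n i _ g acc) hInv)

-- flat index range 0..m*n = concatenation of the per-row blocks
lemma pvRange_shift (a : Int) (n : Nat) :
    PySem.List.pyRange a (a + (n : Int)) 1
      = (PySem.List.pyRange 0 (n : Int) 1).map (fun j => a + j) := by
  rw [PySem.List.pyRange_one, PySem.List.pyRange_one]
  simp [List.map_map, Function.comp_def, add_sub_cancel_left]

lemma pvRange_mul (m n : Nat) :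
    PySem.List.pyRange 0 ((m : Int) * (n : Int)) 1
      = (PySem.List.pyRange 0 (m : Int) 1).flatMap (fun i =>
          (PySem.List.pyRange 0 (n : Int) 1).map (fun j => i * (n : Int) + j)) := by
  induction m with
  | zero => simp [PySem.List.pyRange_one_eq_nil]
  | succ m ih =>
    have hcast : ((m + 1 : Nat) : Int) * (n : Int) = (m : Int) * n + n := by push_cast; ring
    have h1 : (0 : Int) ≤ (m : Int) * n := by positivity
    have h2 : (m : Int) * n ≤ (m : Int) * n + n := by simp
    rw [hcast, PySem.List.pyRange_one_append 0 ((m : Int) * n) ((m : Int) * n + n) h1 h2,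
      pvRange_shift ((m : Int) * n) n, ih,
      show ((m + 1 : Nat) : Int) = (m : Int) + 1 by push_cast; ring,
      PySem.List.pyRange_one_succ_right (by positivity)]
    simp [List.flatMap_append]

-- with zero columns A's inner loop is empty: the whole grid scan is the identity
lemma pvGridA_zero_cols (m n : Int) (hn : n ≤ 0) :
    ∀ (is : List Int) (g : List (List Int)) (acc : List Int),
    pvGridA m n is g acc = (g, acc) := by
  intro is
  induction is with
  | nil => intros; rfl
  | cons i is ih =>
    intro g acc
    simp only [pvGridA, PySem.List.pyRange_one_eq_nil hn, pvRowA]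
    exact ih g acc

-- ===== VERDICT (by name: the statement is the Claim_ definition above) =====
theorem pondSizes_spec : Claim_equal_pondSizes := by
  intro land _ hPre
  unfold Spec_pondSizes pondSizes pondSizes_alt
  simp only []
  by_cases hn : 0 < ((land.headD []).length : Int)
  · rw [show ((land.length : Int) * ((land.headD []).length : Int))
        = ((land.length : Nat) : Int) * (((land.headD []).length : Nat) : Int) from rfl,
      pvRange_mul land.length (land.headD []).length,
      pvScanB_blocks _ _ hn _ land [] ⟨rfl, hPre.2⟩]
  · have hn0 : ((land.headD []).length : Int) = 0 := by omega
    rw [hn0]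
    simp only [mul_zero, PySem.List.pyRange_one_eq_nil (le_refl (0:Int)), pvScanB]
    rw [pvGridA_zero_cols _ 0 (le_refl 0)]
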